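-- pv_equiv track=rewrite | github.com/guilhermelasinskas/trabalho-ecom06 | entity_validator.py | validate_folder
-- ===== SOURCE A (Python) =====
-- def validate_folder(token):
--
--     separated_token = token.split('/')
--
--     for tk in separated_token:
--         if(not validate_file(tk)):
--             return False
--
--     if (token[-1] != '/'):
--         return False
--
--     return True
--
-- def validate_file(token, isFile=False):
--
--     for c in token:
--         ok = False
--         if 'a' <= c and c <= 'z':
--             ok = True
--         elif 'A' <= c and c <= 'Z':
--             ok = True
--         elif '0' <= c and c <= '9':
--             ok = True
--         elif c == '_':
--             ok = True
--         # MEXER NISSO AQUI#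
--         elif c == '.' and isFile:
--             ok = True
--         # MEXER NISSO AQUI#
--         if (not ok):
--             return ok
--
--     return True
-- ===== SOURCE B (Python) =====
-- def validate_folder(token):
--     # one flat pass over the whole token: every char must be alnum/underscore/slash,
--     # and the token must end with '/' (token[-1] raises IndexError on '' like A)
--     for c in token:
--         if not ('a' <= c <= 'z' or 'A' <= c <= 'Z' or '0' <= c <= '9' or c == '_' or c == '/'):
--             return False
--     return token[-1] == '/'
-- ===== Notes on version B (the rewrite author's own statement) =====
-- stated objective: simpler
-- what changed: B drops the split('/') and the nested per-piece validate_file loop: a single flat pass over the token checks every character against the allowed set {a-z,A-Z,0-9,_,/}, then token[-1]=='/' decides the result.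
import Mathlib
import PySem

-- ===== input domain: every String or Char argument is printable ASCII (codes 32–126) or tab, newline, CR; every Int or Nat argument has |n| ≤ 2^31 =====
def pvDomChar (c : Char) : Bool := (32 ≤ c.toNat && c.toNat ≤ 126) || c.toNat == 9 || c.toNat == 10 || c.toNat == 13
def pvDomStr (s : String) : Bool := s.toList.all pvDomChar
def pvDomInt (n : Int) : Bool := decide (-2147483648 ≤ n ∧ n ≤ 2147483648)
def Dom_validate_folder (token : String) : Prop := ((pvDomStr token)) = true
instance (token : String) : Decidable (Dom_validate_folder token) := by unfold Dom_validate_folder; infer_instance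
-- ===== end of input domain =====

-- B replaces A's split('/') + per-piece loop by one flat pass over the token (simpler decomposition).

-- ===== PORT A =====
-- the elif-chain computing `ok` for one character
def vf_ok (c : Char) (isFile : Bool) : Bool :=
  if 'a' ≤ c ∧ c ≤ 'z' then true
  else if 'A' ≤ c ∧ c ≤ 'Z' then true
  else if '0' ≤ c ∧ c ≤ '9' then true
  else if c = '_' then true
  else if c = '.' ∧ isFile then true
  else false

-- `for c in token: … if not ok: return ok` of validate_file
def validate_file_go (isFile : Bool) : List Char → Bool
  | [] => true
  | c :: rest =>
    let ok := vf_ok c isFile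
    if !ok then ok else validate_file_go isFile rest

def validate_file (token : String) (isFile : Bool) : Bool :=
  validate_file_go isFile token.toList

-- `for tk in separated_token: if not validate_file(tk): return False`
def folder_loop : List String → Bool
  | [] => true
  | tk :: rest => if !(validate_file tk false) then false else folder_loop rest

def validate_folder (token : String) : Bool :=
  match PySem.Str.split? token "/" with
  | none => false  -- unreachable: the separator "/" is non-empty
  | some separated_token =>
    if folder_loop separated_token then
      match PySem.Str.pyGet? token (-1) with
      | some c => if c ≠ '/' then false else true
      | none => false  -- IndexError on token == "", excluded by Pre_
    else false

-- ===== PORT B =====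
def vfAllowed (c : Char) : Bool :=
  ('a' ≤ c && c ≤ 'z') || ('A' ≤ c && c ≤ 'Z') || ('0' ≤ c && c ≤ '9') || c == '_' || c == '/'

def validate_folder_alt (token : String) : Bool :=
  if token.toList.all vfAllowed then
    match PySem.Str.pyGet? token (-1) with
    | some c => c == '/'
    | none => false  -- IndexError on token == "", excluded by Pre_
  else false

-- ===== PRECONDITION & SPEC =====
-- Pre_ excludes only the empty token, on which both Pythons raise IndexError at token[-1].
def Pre_validate_folder (token : String) : Prop := token ≠ ""
instance (token : String) : Decidable (Pre_validate_folder token) := by unfold Pre_validate_folder; infer_instance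
def pvWitness_validate_folder : String := "abc/"

def Spec_validate_folder (token : String) (out : Bool) : Prop := out = validate_folder_alt token
instance (token : String) (out : Bool) : Decidable (Spec_validate_folder token out) := by unfold Spec_validate_folder; infer_instance

-- ===== CLAIM (what is proved, stated in full; the proofs are below) =====
def Claim_equal_validate_folder : Prop := ∀ (token : String), Dom_validate_folder token → Pre_validate_folder token → Spec_validate_folder token (validate_folder token)

-- ===== LEMMAS AND PROOFS =====

theorem validate_file_go_eq_all (b : Bool) (cs : List Char) :
    validate_file_go b cs = cs.all (fun c => vf_ok c b) := by
  induction cs with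
  | nil => rfl
  | cons c rest ih =>
    simp only [validate_file_go, List.all_cons, ih]
    cases vf_ok c b <;> simp

theorem folder_loop_eq_all (l : List String) :
    folder_loop l = l.all (fun tk => validate_file tk false) := by
  induction l with
  | nil => rfl
  | cons tk rest ih =>
    simp only [folder_loop, List.all_cons, ih]
    cases validate_file tk false <;> simp

-- one character of a piece is accepted by validate_file iff it is allowed and is not '/'
theorem vf_ok_eq (c : Char) : vf_ok c false = (vfAllowed c && !(c == '/')) := by
  unfold vf_ok vfAllowed
  by_cases h1 : 'a' ≤ c ∧ c ≤ 'z'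
  · have hne : ¬(c = '/') := by intro h; subst h; exact absurd h1 (by decide)
    simp [h1, hne]
  · by_cases h2 : 'A' ≤ c ∧ c ≤ 'Z'
    · have hne : ¬(c = '/') := by intro h; subst h; exact absurd h2 (by decide)
      simp [h1, h2, hne]
    · by_cases h3 : '0' ≤ c ∧ c ≤ '9'
      · have hne : ¬(c = '/') := by intro h; subst h; exact absurd h3 (by decide)
        simp [h1, h2, h3, hne]
      · by_cases h4 : c = '_'
        · simp [h4]
        · by_cases h5 : c = '/'
          · simp [h5]
          · simp [h1, h2, h3, h4, h5]

-- the pieces of splitOn together cover exactly the non-'/' characters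
theorem splitOn_go_all (q : Char → Bool) :
    ∀ (fuel : Nat) (l cur : List Char) (acc : List (List Char)), l.length < fuel →
    (PySem.Chars.splitOn.go ['/'] fuel l cur acc).all (fun p => p.all q) =
      (acc.all (fun p => p.all q) && cur.all q && l.all (fun c => c == '/' || q c)) := by
  intro fuel
  induction fuel with
  | zero => intro l cur acc h; omega
  | succ fuel ih =>
    intro l cur acc h
    match l with
    | [] =>
      simp [PySem.Chars.splitOn.go]
    | c :: rest =>
      by_cases hc : c = '/'
      · subst hc
        rw [show PySem.Chars.splitOn.go ['/'] (fuel+1) ('/' :: rest) cur acc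
              = PySem.Chars.splitOn.go ['/'] fuel rest [] (cur.reverse :: acc) by
            simp [PySem.Chars.splitOn.go, List.isPrefixOf]]
        rw [ih rest [] (cur.reverse :: acc) (by simpa using Nat.lt_of_succ_lt_succ h)]
        simp [Bool.and_assoc, Bool.and_left_comm]
      · rw [show PySem.Chars.splitOn.go ['/'] (fuel+1) (c :: rest) cur acc
              = PySem.Chars.splitOn.go ['/'] fuel rest (c :: cur) acc by
            simp [PySem.Chars.splitOn.go, List.isPrefixOf, Ne.symm hc]]
        rw [ih rest (c :: cur) acc (by simpa using Nat.lt_of_succ_lt_succ h)]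
        simp [show (c == '/') = false by simp [hc], Bool.and_comm, Bool.and_assoc, Bool.and_left_comm]

theorem splitOn_all (cs : List Char) (q : Char → Bool) :
    (PySem.Chars.splitOn cs ['/']).all (fun p => p.all q) = cs.all (fun c => c == '/' || q c) := by
  unfold PySem.Chars.splitOn
  rw [splitOn_go_all q (cs.length + 1) cs [] [] (by omega)]
  simp

theorem all_allowed_eq (cs : List Char) :
    (PySem.Chars.splitOn cs ['/']).all (fun p => p.all (fun c => vf_ok c false)) = cs.all vfAllowed := by
  rw [splitOn_all]
  refine List.all_congr rfl (fun c => ?_)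
  rw [vf_ok_eq]
  by_cases h : c = '/'
  · simp [h, vfAllowed]
  · simp [show (c == '/') = false by simp [h]]

-- ===== VERDICT (by name: the statement is the Claim_ definition above) =====
theorem validate_folder_spec : Claim_equal_validate_folder := by
  intro token _ _
  unfold Spec_validate_folder validate_folder validate_folder_alt
  rw [show PySem.Str.split? token "/" = some ((PySem.Chars.splitOn token.toList ['/']).map String.ofList) by
    simp [PySem.Str.split?, PySem.Chars.split?]]
  show (if folder_loop ((PySem.Chars.splitOn token.toList ['/']).map String.ofList) then
      (match PySem.Str.pyGet? token (-1) with
       | some c => if c ≠ '/' then false else true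
       | none => false)
    else false) = _
  rw [folder_loop_eq_all]
  have : ((PySem.Chars.splitOn token.toList ['/']).map String.ofList).all (fun tk => validate_file tk false)
      = token.toList.all vfAllowed := by
    rw [List.all_map]
    rw [← all_allowed_eq]
    refine List.all_congr rfl (fun p => ?_)
    simp [Function.comp, validate_file, validate_file_go_eq_all]
  rw [this]
  cases htl : token.toList.all vfAllowed
  · simp
  · simp only [if_true]
    cases hg : PySem.Str.pyGet? token (-1) with
    | none => rfl
    | some c => by_cases h : c = '/' <;> simp [h]
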